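-- pv_equiv track=rewrite | github.com/GayeonKimm/CT | z/220205/3.py | solution
-- ===== SOURCE A (Python) =====
-- def solution(k):
--     nums = [6, 2, 5, 5, 4, 5, 6, 3, 7, 6]
--     answer = 0
--
--     for i in range(len(nums)):
--         if nums[i] == k:
--             answer += 1
--         for j in range(len(nums)):
--             if nums[i]+nums[j] == k:
--                 answer += 1
--                 for w in range(len(nums)):
--                     if nums[i] + nums[j] + nums[w] == k:
--                         answer += 1
--                         for h in range(len(nums)):
--                             if nums[i] + nums[j] + nums[w] + nums[h] == k:
--                                 answer += 1
--     return answer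
-- ===== SOURCE B (Python) =====
-- from collections import Counter
--
-- def solution(k):
--     nums = [6, 2, 5, 5, 4, 5, 6, 3, 7, 6]
--     # All nums are positive, so the 3- and 4-term branches of the original
--     # can never fire: only single elements and ordered pairs can equal k.
--     c = Counter(nums)
--     answer = c[k]
--     for a in nums:
--         answer += c[k - a]
--     return answer
-- ===== Notes on version B (the rewrite author's own statement) =====
-- stated objective: simpler
-- what changed: Since every element of the fixed list is positive, A's two innermost nested loops (triple and quadruple sums) are dead code; B drops the nested loops entirely and instead builds a Counter of the list, returning the count of elements equal to k plus, for each element a, the count of elements equal to k-a (ordered pairs).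
import Mathlib
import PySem

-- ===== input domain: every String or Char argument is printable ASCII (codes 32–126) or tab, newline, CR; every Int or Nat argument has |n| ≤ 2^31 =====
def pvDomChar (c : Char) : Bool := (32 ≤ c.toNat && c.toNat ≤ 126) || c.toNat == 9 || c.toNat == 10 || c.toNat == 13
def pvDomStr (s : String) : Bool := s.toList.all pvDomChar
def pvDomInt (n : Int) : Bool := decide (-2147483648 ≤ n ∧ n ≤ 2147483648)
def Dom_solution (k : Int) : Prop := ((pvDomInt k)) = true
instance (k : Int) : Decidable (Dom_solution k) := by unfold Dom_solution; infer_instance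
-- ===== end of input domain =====

-- B changes the algorithm: since every element of nums is positive, the 3- and 4-term
-- branches of A are dead code, so B counts singles and ordered pairs with a Counter (objective: simpler).

-- ===== PORT A =====
def pvNums : List Int := [6, 2, 5, 5, 4, 5, 6, 3, 7, 6]

-- innermost loop 'for h in range(len(nums)): ...'
def pvLoopH (k s3 acc : Int) : Int :=
  (PySem.List.pyRange 0 (pvNums.length : Int) 1).foldl
    (fun acc h => if s3 + PySem.List.pyGetD pvNums h 0 = k then acc + 1 else acc) acc

-- loop 'for w in range(len(nums)): ...'
def pvLoopW (k s2 acc : Int) : Int :=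
  (PySem.List.pyRange 0 (pvNums.length : Int) 1).foldl
    (fun acc w =>
      if s2 + PySem.List.pyGetD pvNums w 0 = k then
        pvLoopH k (s2 + PySem.List.pyGetD pvNums w 0) (acc + 1)
      else acc) acc

-- loop 'for j in range(len(nums)): ...'
def pvLoopJ (k ni acc : Int) : Int :=
  (PySem.List.pyRange 0 (pvNums.length : Int) 1).foldl
    (fun acc j =>
      if ni + PySem.List.pyGetD pvNums j 0 = k then
        pvLoopW k (ni + PySem.List.pyGetD pvNums j 0) (acc + 1)
      else acc) acc

def solution (k : Int) : Int :=
  (PySem.List.pyRange 0 (pvNums.length : Int) 1).foldl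
    (fun acc i =>
      pvLoopJ k (PySem.List.pyGetD pvNums i 0)
        (if PySem.List.pyGetD pvNums i 0 = k then acc + 1 else acc)) 0

-- ===== PORT B =====
def solution_alt (k : Int) : Int :=
  let nums : List Int := [6, 2, 5, 5, 4, 5, 6, 3, 7, 6]
  let c := PySem.Dict.counter nums
  nums.foldl (fun acc a => acc + c.getD (k - a) 0) (c.getD k 0)

-- ===== PRECONDITION & SPEC =====
def Spec_solution (k : Int) (out : Int) : Prop := out = solution_alt k
instance (k : Int) (out : Int) : Decidable (Spec_solution k out) := by unfold Spec_solution; infer_instance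

-- ===== CLAIM (what is proved, stated in full; the proofs are below) =====
def Claim_equal_solution : Prop := ∀ (k : Int), Dom_solution k → Spec_solution k (solution k)

-- ===== LEMMAS AND PROOFS =====

-- every element of pvNums is positive, so once a partial sum equals k the next nested loop adds nothing
theorem pvLoopW_dead (k acc : Int) : pvLoopW k k acc = acc := by
  unfold pvLoopW
  rw [PySem.List.foldl_pyRange_zero_pyGetD' pvNums 0
    (fun acc x => if k + x = k then pvLoopH k (k + x) (acc + 1) else acc) acc]
  simp [pvNums]

theorem pvLoopJ_eq (k ni acc : Int) :
    pvLoopJ k ni acc = pvNums.foldl (fun acc b => if ni + b = k then acc + 1 else acc) acc := by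
  unfold pvLoopJ
  rw [PySem.List.foldl_pyRange_zero_pyGetD' pvNums 0
    (fun acc x => if ni + x = k then pvLoopW k (ni + x) (acc + 1) else acc) acc]
  refine PySem.List.foldl_congr_mem pvNums _ _ acc (fun acc x _ => ?_)
  split_ifs with h
  · rw [h, pvLoopW_dead]
  · rfl

theorem pv_main (xs : List Int) (k : Int) :
    xs.foldl (fun acc a =>
        xs.foldl (fun acc b => if a + b = k then acc + 1 else acc)
          (if a = k then acc + 1 else acc)) 0
    = xs.foldl (fun acc a => acc + (xs.count (k - a) : Int)) ((xs.count k : Int)) := by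
  have hinner : ∀ a acc0 : Int,
      xs.foldl (fun acc b => if a + b = k then acc + 1 else acc) acc0
        = acc0 + (xs.count (k - a) : Int) := by
    intro a acc0
    rw [show (fun acc b => if a + b = k then acc + 1 else acc)
        = (fun (acc : Int) b => if b = k - a then acc + 1 else acc) by
      funext acc b; congr 1; simp; omega]
    rw [PySem.List.foldl_ite_add_one (fun b => b = k - a) xs acc0]
    congr 1
  calc xs.foldl (fun acc a =>
        xs.foldl (fun acc b => if a + b = k then acc + 1 else acc)
          (if a = k then acc + 1 else acc)) 0
      = xs.foldl (fun acc a =>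
          acc + ((if a = k then (1:Int) else 0) + (xs.count (k - a) : Int))) 0 := by
        refine PySem.List.foldl_congr_mem xs _ _ 0 (fun acc a _ => ?_)
        rw [hinner]
        split_ifs <;> ring
    _ = xs.foldl (fun acc a => acc + (xs.count (k - a) : Int)) ((xs.count k : Int)) := by
        rw [PySem.List.foldl_add, PySem.List.foldl_add]
        rw [PySem.List.sum_map_add_int]
        rw [show (fun a : Int => if a = k then (1:Int) else 0)
            = (fun a : Int => if (a == k) = true then (1:Int) else 0) by
          funext a; simp]
        rw [PySem.List.sum_map_ite_one_zero (fun a => a == k) xs]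
        rw [List.count_eq_countP]
        ring

-- ===== VERDICT (by name: the statement is the Claim_ definition above) =====
theorem solution_spec : Claim_equal_solution := by
  intro k _
  unfold Spec_solution solution solution_alt
  rw [PySem.List.foldl_pyRange_zero_pyGetD' pvNums 0
    (fun acc x => pvLoopJ k x (if x = k then acc + 1 else acc)) 0]
  simp only [pvLoopJ_eq]
  simp only [PySem.Dict.getD_counter]
  exact pv_main pvNums k
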